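-- pv_equiv track=rewrite | github.com/vitouphy/scientific_paper_question_generator | analysis/src/question_counter.py | count_question
-- ===== SOURCE A (Python) =====
-- wh_list = [
--     'what',
--     'who',
--     'which',
--     'whom',
--     'where',
--     'when',
--     'whose',
--     'why',
--     'how'
-- ]
--
-- yes_no_list = [
--     'do',
--     'does',
--     'did',
--     'have',
--     'has',
--     'had',
--     'is',
--     'are',
--     'was',
--     'were'
-- ]
--
-- def count_question(titles):
--
--     ''' Count each type of questions '''
--
--     wh_count = 0
--     yes_no_count = 0
--     for title in titles:
--         is_wh = False
--         token = title.split()[0]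
--
--         if token in wh_list:
--             wh_count += 1
--         elif token in yes_no_list:
--             yes_no_count += 1
--     return wh_count, yes_no_count
-- ===== SOURCE B (Python) =====
-- wh_list = [
--     'what',
--     'who',
--     'which',
--     'whom',
--     'where',
--     'when',
--     'whose',
--     'why',
--     'how'
-- ]
--
-- yes_no_list = [
--     'do',
--     'does',
--     'did',
--     'have',
--     'has',
--     'had',
--     'is',
--     'are',
--     'was',
--     'were'
-- ]
--
--
-- def count_question(titles):
--     ''' Count each type of questions '''
--     counts = {}
--     for title in titles:
--         word = title.split()[0]
--         counts[word] = counts.get(word, 0) + 1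
--     wh_count = sum(counts.get(w, 0) for w in wh_list)
--     yes_no_count = sum(counts.get(w, 0) for w in yes_no_list)
--     return wh_count, yes_no_count
-- ===== Notes on version B (the rewrite author's own statement) =====
-- stated objective: idiomatic
-- what changed: Replaces the per-title if/elif branching over both keyword lists with a one-pass frequency table of first words, then sums table lookups over each fixed keyword list.
import Mathlib
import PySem

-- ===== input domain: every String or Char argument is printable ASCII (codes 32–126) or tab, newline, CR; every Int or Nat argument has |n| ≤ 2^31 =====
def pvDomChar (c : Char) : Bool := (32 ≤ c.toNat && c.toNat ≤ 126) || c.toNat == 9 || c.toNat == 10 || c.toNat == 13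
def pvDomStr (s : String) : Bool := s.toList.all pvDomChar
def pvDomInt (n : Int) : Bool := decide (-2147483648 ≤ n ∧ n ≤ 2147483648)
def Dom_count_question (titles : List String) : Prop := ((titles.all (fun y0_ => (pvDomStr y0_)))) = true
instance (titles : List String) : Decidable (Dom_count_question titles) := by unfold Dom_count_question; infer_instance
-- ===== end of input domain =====

-- B replaces A's per-title if/elif branching with a one-pass first-word frequency
-- table, then sums lookups over the two fixed keyword lists (idiomatic restructuring).

-- ===== PORT A =====
def wh_list : List String :=
  ["what", "who", "which", "whom", "where", "when", "whose", "why", "how"]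

def yes_no_list : List String :=
  ["do", "does", "did", "have", "has", "had", "is", "are", "was", "were"]

-- title.split()[0] raises IndexError when the split is empty; Pre_ excludes that,
-- and the `none` branch (unreachable under Pre_) leaves the state unchanged.
def count_question (titles : List String) : Int × Int :=
  titles.foldl
    (fun (st : Int × Int) title =>
      match PySem.List.pyGet? (PySem.Str.split₀ title) 0 with
      | none => st
      | some token =>
        if wh_list.contains token then (st.1 + 1, st.2)
        else if yes_no_list.contains token then (st.1, st.2 + 1)
        else st)
    (0, 0)

-- ===== PORT B =====
-- the dict-building loop of Source B; '' stands in for the IndexError case excluded by Pre_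
def count_question_alt (titles : List String) : Int × Int :=
  let counts : PySem.Dict String Int :=
    titles.foldl
      (fun d title =>
        let word := PySem.List.pyGetD (PySem.Str.split₀ title) 0 ""
        d.insert word (d.getD word 0 + 1))
      PySem.Dict.empty
  ((wh_list.map (fun w => counts.getD w 0)).sum,
   (yes_no_list.map (fun w => counts.getD w 0)).sum)

-- ===== PRECONDITION & SPEC =====
-- Pre_ excludes titles with no whitespace-separated token (empty / all-whitespace
-- strings), on which Python's title.split()[0] raises IndexError in both A and B.
def Pre_count_question (titles : List String) : Prop :=
  ∀ t ∈ titles, PySem.Str.split₀ t ≠ []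
instance (titles : List String) : Decidable (Pre_count_question titles) := by
  unfold Pre_count_question; infer_instance

def pvWitness_count_question : List String :=
  ["what is life", "is it real", "hello world", "how"]

def Spec_count_question (titles : List String) (out : Int × Int) : Prop :=
  out = count_question_alt titles
instance (titles : List String) (out : Int × Int) : Decidable (Spec_count_question titles out) := by
  unfold Spec_count_question; infer_instance

-- ===== CLAIM (what is proved, stated in full; the proofs are below) =====
def Claim_equal_count_question : Prop :=
  ∀ (titles : List String), Dom_count_question titles → Pre_count_question titles →
    Spec_count_question titles (count_question titles)

-- ===== LEMMAS AND PROOFS =====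

-- the first word of a title, as both ports compute it under Pre_
def pvTok (t : String) : String := PySem.List.pyGetD (PySem.Str.split₀ t) 0 ""

lemma sum_map_ite_eq_of_not_mem (x : String) (L : List String) (h : x ∉ L) :
    (L.map (fun w => if x = w then (1 : Int) else 0)).sum = 0 := by
  induction L with
  | nil => simp
  | cons w L ih =>
    simp only [List.mem_cons, not_or] at h
    simp [h.1, ih h.2]

lemma sum_map_ite_mem (x : String) (L : List String) (hL : L.Nodup) :
    (L.map (fun w => if x = w then (1 : Int) else 0)).sum
      = if L.contains x then 1 else 0 := by
  induction L with
  | nil => simp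
  | cons w L ih =>
    rcases List.nodup_cons.mp hL with ⟨hw, hL'⟩
    by_cases hx : x = w
    · subst hx
      simp [sum_map_ite_eq_of_not_mem x L hw]
    · simp only [List.map_cons, List.sum_cons, if_neg hx, zero_add, ih hL',
        List.contains_cons]
      simp [hx]

lemma sum_map_count_eq_countP (L tokens : List String) (hL : L.Nodup) :
    (L.map (fun w => (tokens.count w : Int))).sum
      = ((tokens.countP (fun t => L.contains t) : Nat) : Int) := by
  induction tokens with
  | nil => simp
  | cons x ts ih =>
    have hcount : ∀ w : String, ((x :: ts).count w : Int)
        = (ts.count w : Int) + (if x = w then (1 : Int) else 0) := by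
      intro w
      by_cases h : x = w
      · subst h; simp
      · have hwx : (w == x) = false := by
          simpa using fun hh => h hh.symm
        simp [List.count_cons, hwx]
    calc (L.map (fun w => ((x :: ts).count w : Int))).sum
        = (L.map (fun w => (ts.count w : Int) + (if x = w then (1:Int) else 0))).sum := by
          simp only [hcount]
      _ = (L.map (fun w => (ts.count w : Int))).sum
            + (L.map (fun w => if x = w then (1:Int) else 0)).sum := by
          rw [← List.sum_map_add]
      _ = _ := by
          rw [ih, sum_map_ite_mem x L hL, List.countP_cons]
          by_cases h : L.contains x <;> simp


lemma wh_yes_no_disjoint (s : String) (h : s ∈ wh_list) : s ∉ yes_no_list := by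
  fin_cases h <;> decide

-- A's loop, characterised by countP over the token list
lemma count_question_loop (titles : List String)
    (hpre : ∀ t ∈ titles, PySem.Str.split₀ t ≠ []) (a b : Int) :
    titles.foldl
      (fun (st : Int × Int) title =>
        match PySem.List.pyGet? (PySem.Str.split₀ title) 0 with
        | none => st
        | some token =>
          if wh_list.contains token then (st.1 + 1, st.2)
          else if yes_no_list.contains token then (st.1, st.2 + 1)
          else st)
      (a, b)
    = (a + ((titles.map pvTok).countP (fun t => wh_list.contains t) : Nat),
       b + ((titles.map pvTok).countP (fun t => yes_no_list.contains t) : Nat)) := by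
  induction titles generalizing a b with
  | nil => simp
  | cons t ts ih =>
    have hne := hpre t (by simp)
    obtain ⟨hd, tl, hsplit⟩ : ∃ hd tl, PySem.Str.split₀ t = hd :: tl := by
      cases h : PySem.Str.split₀ t with
      | nil => exact absurd h hne
      | cons hd tl => exact ⟨hd, tl, rfl⟩
    have htok : pvTok t = hd := by simp [pvTok, hsplit, PySem.List.pyGetD]
    have hget : PySem.List.pyGet? (PySem.Str.split₀ t) 0 = some hd := by
      simp [hsplit, PySem.List.pyGet?, PySem.List.pyIdx?]
    have hpre' : ∀ x ∈ ts, PySem.Str.split₀ x ≠ [] :=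
      fun x hx => hpre x (by simp [hx])
    simp only [List.foldl_cons, hget, List.map_cons, htok, List.countP_cons]
    by_cases hwh : wh_list.contains hd
    · have hmem : hd ∈ wh_list := by simpa using hwh
      have hyn : yes_no_list.contains hd = false := by
        simpa using wh_yes_no_disjoint hd hmem
      simp only [hwh, if_true, ih hpre', hyn]
      simp only [Prod.mk.injEq]
      refine ⟨?_, ?_⟩ <;> push_cast <;> ring
    · by_cases hyn : yes_no_list.contains hd
      · simp only [hwh, if_false, hyn, if_true, ih hpre', Bool.false_eq_true]
        simp only [Prod.mk.injEq]
        refine ⟨?_, ?_⟩ <;> push_cast <;> ring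
      · simp only [hwh, if_false, hyn, ih hpre', Bool.false_eq_true]
        simp

-- B's result, characterised the same way
lemma count_question_alt_eq (titles : List String) :
    count_question_alt titles
      = ((((titles.map pvTok).countP (fun t => wh_list.contains t) : Nat) : Int),
         (((titles.map pvTok).countP (fun t => yes_no_list.contains t) : Nat) : Int)) := by
  simp only [count_question_alt]
  have hfold : titles.foldl
      (fun (d : PySem.Dict String Int) title =>
        d.insert (PySem.List.pyGetD (PySem.Str.split₀ title) 0 "")
          (d.getD (PySem.List.pyGetD (PySem.Str.split₀ title) 0 "") 0 + 1))
      PySem.Dict.empty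
    = (titles.map pvTok).foldl
        (fun (d : PySem.Dict String Int) w => d.insert w (d.getD w 0 + 1)) PySem.Dict.empty := by
    rw [List.foldl_map]
    simp only [pvTok]
  have hgetD : ∀ w : String,
      ((titles.map pvTok).foldl
        (fun (d : PySem.Dict String Int) w => d.insert w (d.getD w 0 + 1)) PySem.Dict.empty).getD w 0
      = ((titles.map pvTok).count w : Int) := by
    intro w
    rw [PySem.Dict.getD_foldl_insert_add_one]
    simp [PySem.Dict.getD_empty]
  rw [hfold]
  simp only [hgetD]
  rw [sum_map_count_eq_countP _ _ (by decide),
      sum_map_count_eq_countP _ _ (by decide)]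

-- ===== VERDICT (by name: the statement is the Claim_ definition above) =====
theorem count_question_spec : Claim_equal_count_question := by
  intro titles _ hpre
  unfold Spec_count_question
  unfold count_question
  rw [count_question_loop titles hpre 0 0, count_question_alt_eq]
  simp
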